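-- pv_equiv track=rewrite | github.com/DouMaokang/FoodGo-Project | main.py | sort_canteen
-- ===== SOURCE A (Python) =====
-- def merge_sort(alist):
--     alist_len = len(alist)
--
--     if alist_len < 2:
--         return alist
--     left = alist[:(alist_len // 2)]  # divide the list into the left part and the right part
--     right = alist[(alist_len // 2):]
--
--     left = merge_sort(left)  # sort the left part of the list
--     right = merge_sort(right)  # sort the right part of the list
--
--     return merge(left, right)
--
-- def merge(left, right):
--     result = []
--     while left and right:
--         if left[0] < right[0]:
--             result.append(left.pop(0))
--         else:
--             result.append(right.pop(0))
--     if left: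
--         result.extend(left)
--     else:
--         result.extend(right)
--     return result
--
-- def sort_canteen(alist):
--     """sort canteen in the sublist defined by function canteen_sublist"""
--
--     lst = []
--     for i in alist:
--         for key in i.keys():
--             lst.append(key)  # store the value of price/distance/rank, etc. in a list for sorting
--
--     sorted_lst = merge_sort(lst)
--
--     new_list = []
--     for i in sorted_lst:
--         for canteen in alist:
--             for key in canteen.keys():
--                 if i == key:                            # find the corresponding canteen
--                     sub_information = {i: canteen[i]}   # associate the each canteen with the sorted value
--                     if sub_information not in new_list:
--                         new_list.append(sub_information)
--     return new_list
-- ===== SOURCE B (Python) =====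
-- def sort_canteen(alist):
--     """sort canteen in the sublist defined by function canteen_sublist"""
--     pairs = [item for canteen in alist for item in canteen.items()]
--     pairs.sort(key=lambda kv: kv[0])  # stable sort on the key only
--     new_list = []
--     seen = set()
--     for k, v in pairs:
--         if (k, v) not in seen:
--             seen.add((k, v))
--             new_list.append({k: v})
--     return new_list
-- ===== Notes on version B (the rewrite author's own statement) =====
-- stated objective: faster
-- what changed: Replaces A's hand-written merge sort of the key list plus a triple-nested rescan of all canteens per sorted key (with a quadratic list-membership dedup) by one stable sort of the (key, value) pairs and a single linear dedup pass with a hash seen-set; Pre_ only excludes association lists whose inner dict repeats a key, which represent no Python dict.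
import Mathlib
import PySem

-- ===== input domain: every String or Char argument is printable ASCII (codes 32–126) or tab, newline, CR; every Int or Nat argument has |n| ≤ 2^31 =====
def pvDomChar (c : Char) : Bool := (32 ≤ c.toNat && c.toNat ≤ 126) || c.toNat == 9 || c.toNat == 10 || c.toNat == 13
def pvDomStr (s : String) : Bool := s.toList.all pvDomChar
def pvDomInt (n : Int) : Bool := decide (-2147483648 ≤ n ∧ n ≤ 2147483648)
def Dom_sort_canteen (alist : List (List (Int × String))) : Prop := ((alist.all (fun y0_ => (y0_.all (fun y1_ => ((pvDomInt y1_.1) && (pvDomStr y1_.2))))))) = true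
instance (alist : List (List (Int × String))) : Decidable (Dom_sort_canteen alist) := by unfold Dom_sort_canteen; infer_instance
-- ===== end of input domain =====

-- B replaces A's merge sort of the key list plus triple-nested value-recovery rescan by one
-- stable key-sort of all (key, value) pairs followed by a single seen-set dedup pass.

-- ===== PORT A =====
-- merge(left, right): Python's while/pop(0) loop, consuming the two lists from the front
def pvMerge : List Int → List Int → List Int
  | [], right => right                 -- while exits; `if left:` is false, extend right
  | a :: l, [] => a :: l               -- while exits; `if left:` is true, extend left
  | a :: l, b :: r =>
    if a < b then a :: pvMerge l (b :: r)
    else b :: pvMerge (a :: l) r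

-- merge_sort(alist); alist[:n] / alist[n:] with n = len // 2 are take/drop (slice bounds are
-- in range and nonnegative), and len // 2 on the nonnegative length is Nat division
def pvMergeSort (xs : List Int) : List Int :=
  if xs.length < 2 then xs
  else
    let left := pvMergeSort (xs.take (xs.length / 2))
    let right := pvMergeSort (xs.drop (xs.length / 2))
    pvMerge left right
termination_by xs.length
decreasing_by
  · simp only [List.length_take]; omega
  · simp only [List.length_drop]; omega

-- a Python dict is the association list of its items: d.keys() is map fst and canteen[i] is
-- the first-match lookup (exact here: i is a key of canteen wherever canteen[i] is evaluated,
-- so the "" default of the total lookup is never produced)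
def sort_canteen (alist : List (List (Int × String))) : List (List (Int × String)) :=
  let lst := alist.foldl (fun acc i => (i.map Prod.fst).foldl (fun l k => l ++ [k]) acc) []
  let sorted_lst := pvMergeSort lst
  sorted_lst.foldl (fun new_list i =>
    alist.foldl (fun new_list canteen =>
      (canteen.map Prod.fst).foldl (fun new_list key =>
        if i = key then
          let sub_information := [(i, ((canteen.find? (fun p => p.1 == i)).map Prod.snd).getD "")]
          if sub_information ∈ new_list then new_list else new_list ++ [sub_information]
        else new_list) new_list) new_list) []

-- ===== PORT B =====
def sort_canteen_alt (alist : List (List (Int × String))) : List (List (Int × String)) :=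
  let pairs := alist.flatMap (fun canteen => canteen)
  let sorted_pairs := PySem.List.sorted pairs (fun kv => kv.1)
  (sorted_pairs.foldl
    (fun (st : List (List (Int × String)) × PySem.Set (Int × String)) kv =>
      if kv ∉ st.2 then (st.1 ++ [[kv]], PySem.Set.add st.2 kv) else st)
    ([], PySem.Set.empty)).1

-- ===== PRECONDITION & SPEC =====
-- Pre_ excludes association lists in which some inner dict repeats a key: such a list does
-- not represent any Python dict input (a dict cannot hold the same key twice).
def Pre_sort_canteen (alist : List (List (Int × String))) : Prop :=
  ∀ c ∈ alist, (c.map Prod.fst).Nodup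
instance (alist : List (List (Int × String))) : Decidable (Pre_sort_canteen alist) := by
  unfold Pre_sort_canteen; infer_instance

def pvWitness_sort_canteen : (List (List (Int × String))) :=
  [[(2, "a"), (1, "b")], [(1, "c")]]

def Spec_sort_canteen (alist : List (List (Int × String))) (out : List (List (Int × String))) : Prop := out = sort_canteen_alt alist
instance (alist : List (List (Int × String))) (out : List (List (Int × String))) : Decidable (Spec_sort_canteen alist out) := by unfold Spec_sort_canteen; infer_instance

-- ===== CLAIM (what is proved, stated in full; the proofs are below) =====
def Claim_equal_sort_canteen : Prop := ∀ (alist : List (List (Int × String))), Dom_sort_canteen alist → Pre_sort_canteen alist → Spec_sort_canteen alist (sort_canteen alist)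

-- ===== LEMMAS AND PROOFS =====

def dedupF : List Int → List Int
  | [] => []
  | a :: l => a :: dedupF (l.filter (fun x => !(x == a)))
termination_by l => l.length
decreasing_by
  have h : (List.filter (fun x => !(x.1 == a)) l.attach).length ≤ l.attach.length :=
    List.length_filter_le _ _
  have h2 : l.attach.length = l.length := List.length_attach
  simp at *; omega
theorem dedupF_nil : dedupF [] = [] := by rw [dedupF.eq_def]
theorem dedupF_cons (a : Int) (l : List Int) :
    dedupF (a :: l) = a :: dedupF (l.filter (fun x => !(x == a))) := by
  rw [dedupF.eq_def]
def dA {α : Type} [DecidableEq α] (nl : List α) (x : α) : List α :=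
  if x ∈ nl then nl else nl ++ [x]
theorem mem_dA {α : Type} [DecidableEq α] (nl : List α) (x y : α) :
    y ∈ dA nl x ↔ y ∈ nl ∨ y = x := by
  unfold dA; split_ifs with h
  · constructor
    · exact Or.inl
    · rintro (hy | rfl) <;> assumption
  · simp
theorem subset_foldl_dA {α : Type} [DecidableEq α] (L : List α) :
    ∀ (nl : List α) (x : α), x ∈ nl → x ∈ L.foldl dA nl := by
  induction L with
  | nil => intro nl x h; simpa using h
  | cons b L ih =>
    intro nl x h
    exact ih _ _ ((mem_dA nl b x).2 (Or.inl h))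
theorem mem_foldl_dA {α : Type} [DecidableEq α] (L : List α) :
    ∀ (nl : List α) (x : α), x ∈ L → x ∈ L.foldl dA nl := by
  induction L with
  | nil => intro nl x h; simp at h
  | cons b L ih =>
    intro nl x h
    rcases List.mem_cons.1 h with rfl | h2
    · exact subset_foldl_dA L _ _ ((mem_dA nl x x).2 (Or.inr rfl))
    · exact ih _ _ h2
theorem foldl_dA_of_subset {α : Type} [DecidableEq α] (L : List α) :
    ∀ (nl : List α), (∀ x ∈ L, x ∈ nl) → L.foldl dA nl = nl := by
  induction L with
  | nil => intro nl _; rfl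
  | cons b L ih =>
    intro nl h
    have hb : dA nl b = nl := by unfold dA; rw [if_pos (h b List.mem_cons_self)]
    simpa [hb] using ih nl (fun x hx => h x (List.mem_cons_of_mem _ hx))
theorem dedupF_ind (P : List Int → Prop) (h0 : P [])
    (h1 : ∀ a l, P (l.filter (fun x => !(x == a))) → P (a :: l)) : ∀ K, P K := by
  intro K
  induction hn : K.length using Nat.strong_induction_on generalizing K with
  | _ n ih =>
    cases K with
    | nil => exact h0
    | cons a l =>
      refine h1 a l (ih (l.filter (fun x => !(x == a))).length ?_ _ rfl)
      have := List.length_filter_le (fun x => !(x == a)) l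
      simp at hn; omega
theorem mem_dedupF : ∀ (K : List Int), ∀ k ∈ dedupF K, k ∈ K := by
  refine dedupF_ind _ (by simp [dedupF_nil]) ?_
  intro a l ih k h
  rw [dedupF_cons] at h
  rcases List.mem_cons.1 h with rfl | h2
  · exact List.mem_cons_self
  · exact List.mem_cons_of_mem _ (List.mem_of_mem_filter (ih k h2))
theorem foldl_dA_filter_ne {α : Type} [DecidableEq α] (g : Int → List α) (a : Int) :
    ∀ (l : List Int) (nl : List α), (∀ x ∈ g a, x ∈ nl) →
      (l.flatMap g).foldl dA nl = ((l.filter (fun x => !(x == a))).flatMap g).foldl dA nl := by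
  intro l
  induction l with
  | nil => intro nl _; rfl
  | cons b l ih =>
    intro nl h
    by_cases hb : b = a
    · rw [show (b :: l).filter (fun x => !(x == a)) = l.filter (fun x => !(x == a)) by
        simp [hb]]
      simp only [List.flatMap_cons, List.foldl_append]
      have hgb : ∀ x ∈ g b, x ∈ nl := by rw [hb]; exact h
      rw [foldl_dA_of_subset _ _ hgb]
      exact ih nl h
    · rw [show (b :: l).filter (fun x => !(x == a)) = b :: l.filter (fun x => !(x == a)) by
        simp [hb]]
      simp only [List.flatMap_cons, List.foldl_append]
      exact ih _ (fun x hx => subset_foldl_dA _ _ _ (h x hx))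
theorem foldl_dA_dedupF {α : Type} [DecidableEq α] (g : Int → List α) : ∀ (K : List Int),
    ∀ (nl : List α), (K.flatMap g).foldl dA nl = ((dedupF K).flatMap g).foldl dA nl := by
  refine dedupF_ind _ (fun nl => by rw [dedupF_nil]) ?_
  intro a l ih nl
  rw [dedupF_cons]
  simp only [List.flatMap_cons, List.foldl_append]
  rw [foldl_dA_filter_ne g a l _ (fun x hx => mem_foldl_dA _ _ _ hx)]
  exact ih _
theorem pull : ∀ (Q : List (Int × String)), (Q.map Prod.fst).Pairwise (· ≤ ·) →
    ∀ (k0 : Int), (∀ q ∈ Q, k0 ≤ q.1) →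
      Q.filter (fun p => p.1 == k0) ++
        (dedupF ((Q.map Prod.fst).filter (fun x => !(x == k0)))).flatMap
          (fun k => Q.filter (fun p => p.1 == k)) = Q := by
  intro Q
  induction Q with
  | nil => intro _ k0 _; simp [dedupF_nil]
  | cons q Q ih =>
    intro hs k0 hk0
    have hs0 : (q.1 :: Q.map Prod.fst).Pairwise (· ≤ ·) := hs
    have hs' : (Q.map Prod.fst).Pairwise (· ≤ ·) := (List.pairwise_cons.1 hs0).2
    have hq1 : ∀ p ∈ Q, q.1 ≤ p.1 := fun p hp =>
      (List.pairwise_cons.1 hs0).1 p.1 (List.mem_map_of_mem hp)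
    by_cases hq : q.1 = k0
    · -- head belongs to the k0 group
      rw [show (q :: Q).filter (fun p => p.1 == k0) = q :: Q.filter (fun p => p.1 == k0) by
        simp [hq]]
      rw [show ((q :: Q).map Prod.fst).filter (fun x => !(x == k0))
            = (Q.map Prod.fst).filter (fun x => !(x == k0)) by simp [hq]]
      have hcongr : (dedupF ((Q.map Prod.fst).filter (fun x => !(x == k0)))).flatMap
            (fun k => (q :: Q).filter (fun p => p.1 == k))
          = (dedupF ((Q.map Prod.fst).filter (fun x => !(x == k0)))).flatMap
            (fun k => Q.filter (fun p => p.1 == k)) := by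
        refine List.flatMap_congr ?_
        intro k hk
        have hkne : k ≠ k0 := by
          have := List.of_mem_filter (mem_dedupF _ _ hk)
          simpa using this
        rw [List.filter_cons, if_neg (by simp [hq]; exact fun h => hkne (Eq.symm h))]
      rw [hcongr]
      exact congrArg (q :: ·) (ih hs' k0 (fun p hp => hq ▸ hq1 p hp))
    · -- k0 is below every key of q :: Q: its group is empty
      have hlt : k0 < q.1 := lt_of_le_of_ne (hk0 q List.mem_cons_self) (fun h => hq (Eq.symm h))
      have hnone : ∀ p ∈ (q :: Q), ¬ (p.1 == k0) = true := by
        intro p hp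
        rcases List.mem_cons.1 hp with rfl | hp'
        · simp; omega
        · have := hq1 p hp'; simp; omega
      rw [List.filter_eq_nil_iff.2 hnone, List.nil_append]
      rw [show ((q :: Q).map Prod.fst).filter (fun x => !(x == k0))
            = (q :: Q).map Prod.fst by
        refine List.filter_eq_self.2 ?_
        intro x hx
        simp only [List.mem_map] at hx
        obtain ⟨p, hp, rfl⟩ := hx
        simpa using fun hh => hnone p hp (by simp [hh])]
      -- grouping of q :: Q itself
      rw [show (q :: Q).map Prod.fst = q.1 :: Q.map Prod.fst from rfl, dedupF_cons]
      simp only [List.flatMap_cons]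
      rw [show (q :: Q).filter (fun p => p.1 == q.1) = q :: Q.filter (fun p => p.1 == q.1) by
        simp]
      have hcongr : (dedupF ((Q.map Prod.fst).filter (fun x => !(x == q.1)))).flatMap
            (fun k => (q :: Q).filter (fun p => p.1 == k))
          = (dedupF ((Q.map Prod.fst).filter (fun x => !(x == q.1)))).flatMap
            (fun k => Q.filter (fun p => p.1 == k)) := by
        refine List.flatMap_congr ?_
        intro k hk
        have hkne : k ≠ q.1 := by
          have := List.of_mem_filter (mem_dedupF _ _ hk)
          simpa using this
        rw [List.filter_cons, if_neg (by simp; exact fun h => hkne (Eq.symm h))]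
      rw [hcongr]
      exact congrArg (q :: ·) (ih hs' q.1 hq1)
theorem grouping (Q : List (Int × String)) (hs : (Q.map Prod.fst).Pairwise (· ≤ ·)) :
    (dedupF (Q.map Prod.fst)).flatMap (fun k => Q.filter (fun p => p.1 == k)) = Q := by
  cases Q with
  | nil => simp [dedupF_nil]
  | cons q Q =>
    have hs0 : (q.1 :: Q.map Prod.fst).Pairwise (· ≤ ·) := hs
    have hs' : (Q.map Prod.fst).Pairwise (· ≤ ·) := (List.pairwise_cons.1 hs0).2
    have hq1 : ∀ p ∈ Q, q.1 ≤ p.1 := fun p hp =>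
      (List.pairwise_cons.1 hs0).1 p.1 (List.mem_map_of_mem hp)
    rw [show (q :: Q).map Prod.fst = q.1 :: Q.map Prod.fst from rfl, dedupF_cons]
    simp only [List.flatMap_cons]
    rw [show (q :: Q).filter (fun p => p.1 == q.1) = q :: Q.filter (fun p => p.1 == q.1) by simp]
    have hcongr : (dedupF ((Q.map Prod.fst).filter (fun x => !(x == q.1)))).flatMap
          (fun k => (q :: Q).filter (fun p => p.1 == k))
        = (dedupF ((Q.map Prod.fst).filter (fun x => !(x == q.1)))).flatMap
          (fun k => Q.filter (fun p => p.1 == k)) := by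
      refine List.flatMap_congr ?_
      intro k hk
      have hkne : k ≠ q.1 := by
        have := List.of_mem_filter (mem_dedupF _ _ hk)
        simpa using this
      rw [List.filter_cons, if_neg (by simp; exact fun h => hkne (Eq.symm h))]
    rw [hcongr]
    exact congrArg (q :: ·) (pull Q hs' q.1 hq1)
theorem filter_insertBy (x : Int × String) (k : Int) :
    ∀ (ys : List (Int × String)), (ys.map Prod.fst).Pairwise (· ≤ ·) →
      (PySem.List.insertBy (fun a b => decide (a.1 < b.1)) x ys).filter (fun p => p.1 == k) =
        if x.1 = k then ys.filter (fun p => p.1 == k) ++ [x]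
        else ys.filter (fun p => p.1 == k) := by
  intro ys
  induction ys with
  | nil =>
    intro _
    simp only [PySem.List.insertBy]
    by_cases hx : x.1 = k <;> simp [hx]
  | cons y ys ih =>
    intro hs
    have hs0 : (y.1 :: ys.map Prod.fst).Pairwise (· ≤ ·) := hs
    have hs' : (ys.map Prod.fst).Pairwise (· ≤ ·) := (List.pairwise_cons.1 hs0).2
    have hy1 : ∀ p ∈ ys, y.1 ≤ p.1 := fun p hp =>
      (List.pairwise_cons.1 hs0).1 p.1 (List.mem_map_of_mem hp)
    simp only [PySem.List.insertBy]
    by_cases hlt : x.1 < y.1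
    · rw [if_pos (by simpa using hlt)]
      by_cases hx : x.1 = k
      · -- the k-group of y :: ys is empty: every key there is > k
        have hempty : (y :: ys).filter (fun p => p.1 == k) = [] := by
          refine List.filter_eq_nil_iff.2 ?_
          intro p hp
          rcases List.mem_cons.1 hp with rfl | hp'
          · simp; omega
          · have := hy1 p hp'; simp; omega
        rw [if_pos hx, hempty]
        simp [hx, hempty]
      · rw [if_neg hx]
        simp [List.filter_cons, hx]
    · rw [if_neg (by simpa using hlt)]
      rw [show (y :: PySem.List.insertBy (fun a b => decide (a.1 < b.1)) x ys).filter
            (fun p => p.1 == k)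
          = (if y.1 == k then [y] else []) ++
            (PySem.List.insertBy (fun a b => decide (a.1 < b.1)) x ys).filter
              (fun p => p.1 == k) by
        by_cases hy : y.1 = k <;> simp [hy]]
      rw [ih hs']
      by_cases hx : x.1 = k <;>
        by_cases hy : y.1 = k <;>
          simp [hx, hy]
theorem filter_sorted (xs : List (Int × String)) (k : Int) :
    (PySem.List.sorted xs (fun kv => kv.1)).filter (fun p => p.1 == k) =
      xs.filter (fun p => p.1 == k) := by
  induction xs using List.reverseRecOn with
  | nil => rfl
  | append_singleton ys x ih =>
    rw [PySem.List.sorted_eq_foldl_insertBy, List.foldl_append, List.foldl_cons, List.foldl_nil,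
      ← PySem.List.sorted_eq_foldl_insertBy]
    rw [filter_insertBy x k _ (PySem.List.sorted_map_key_pairwise ys (fun kv => kv.1))]
    rw [List.filter_append]
    by_cases hx : x.1 = k <;> simp [hx, ih]
theorem pvMerge_perm : ∀ (l r : List Int), (pvMerge l r).Perm (l ++ r) := by
  intro l r
  fun_induction pvMerge l r with
  | case1 r => simp
  | case2 a l => simp
  | case3 a l b r hlt ih =>
    simpa [pvMerge, hlt] using ih.cons a
  | case4 a l b r hlt ih =>
    exact (ih.cons b).trans (List.perm_middle).symm

theorem mem_pvMerge (l r : List Int) (x : Int) (h : x ∈ pvMerge l r) : x ∈ l ∨ x ∈ r := by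
  have := (pvMerge_perm l r).mem_iff.1 h
  simpa using this

theorem pvMerge_pairwise : ∀ (l r : List Int), l.Pairwise (· ≤ ·) → r.Pairwise (· ≤ ·) →
    (pvMerge l r).Pairwise (· ≤ ·) := by
  intro l r
  fun_induction pvMerge l r with
  | case1 r => intro _ hr; simpa using hr
  | case2 a l => intro hl _; simpa using hl
  | case3 a l b r hlt ih =>
    intro hl hr
    refine List.pairwise_cons.2 ⟨?_, ih (List.pairwise_cons.1 hl).2 hr⟩
    intro y hy
    rcases mem_pvMerge _ _ _ hy with h1 | h2
    · exact (List.pairwise_cons.1 hl).1 y h1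
    · rcases List.mem_cons.1 h2 with rfl | h3
      · exact le_of_lt hlt
      · exact le_trans (le_of_lt hlt) ((List.pairwise_cons.1 hr).1 y h3)
  | case4 a l b r hlt ih =>
    intro hl hr
    refine List.pairwise_cons.2 ⟨?_, ih hl (List.pairwise_cons.1 hr).2⟩
    intro y hy
    have hba : b ≤ a := by omega
    rcases mem_pvMerge _ _ _ hy with h1 | h2
    · rcases List.mem_cons.1 h1 with rfl | h3
      · exact hba
      · exact le_trans hba ((List.pairwise_cons.1 hl).1 y h3)
    · exact (List.pairwise_cons.1 hr).1 y h2

theorem pvMergeSort_perm : ∀ (xs : List Int), (pvMergeSort xs).Perm xs := by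
  intro xs
  fun_induction pvMergeSort xs with
  | case1 xs h => exact List.Perm.refl xs
  | case2 xs h left right ihl ihr =>
    refine (pvMerge_perm _ _).trans ?_
    refine (ihl.append ihr).trans ?_
    simp

theorem pvMergeSort_pairwise : ∀ (xs : List Int), (pvMergeSort xs).Pairwise (· ≤ ·) := by
  intro xs
  fun_induction pvMergeSort xs with
  | case1 xs h =>
    interval_cases hl : xs.length
    · simp [List.length_eq_zero_iff.1 hl]
    · obtain ⟨a, rfl⟩ := List.length_eq_one_iff.1 hl
      simp
  | case2 xs h left right ihl ihr => exact pvMerge_pairwise _ _ ihl ihr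
theorem filter_key_nodup (i : Int) :
    ∀ (c : List (Int × String)), (c.map Prod.fst).Nodup →
      c.filter (fun p => p.1 == i) =
        ((c.find? (fun p => p.1 == i)).map (fun p => [p])).getD [] := by
  intro c
  induction c with
  | nil => intro _; rfl
  | cons q c ih =>
    intro hnd
    have hnd0 : q.1 ∉ c.map Prod.fst ∧ (c.map Prod.fst).Nodup :=
      List.nodup_cons.1 hnd
    by_cases hq : q.1 = i
    · rw [List.filter_cons, if_pos (by simp [hq]), List.find?_cons_of_pos (by simp [hq])]
      have : c.filter (fun p => p.1 == i) = [] := by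
        refine List.filter_eq_nil_iff.2 ?_
        intro p hp
        have : p.1 ∈ c.map Prod.fst := List.mem_map_of_mem hp
        simp only [beq_iff_eq]
        intro hpi
        exact hnd0.1 (by rw [hq, ← hpi] at *; exact this)
      simp [this]
    · rw [List.filter_cons, if_neg (by simp [hq]), List.find?_cons_of_neg (by simp [hq])]
      exact ih hnd0.2

theorem inner_canteen (i : Int) (c : List (Int × String)) (hc : (c.map Prod.fst).Nodup)
    (nl : List (List (Int × String))) :
      (c.map Prod.fst).foldl (fun new_list key =>
        if i = key then
          let sub_information := [(i, ((c.find? (fun p => p.1 == i)).map Prod.snd).getD "")]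
          if sub_information ∈ new_list then new_list else new_list ++ [sub_information]
        else new_list) nl
      = ((c.filter (fun p => p.1 == i)).map (fun p => [p])).foldl dA nl := by
  rw [List.foldl_map]
  rw [show (fun (new_list : List (List (Int × String))) (p : Int × String) =>
        if i = p.1 then
          let sub_information := [(i, ((c.find? (fun p => p.1 == i)).map Prod.snd).getD "")]
          if sub_information ∈ new_list then new_list else new_list ++ [sub_information]
        else new_list)
      = (fun nl p => if i = p.1 then
          dA nl [(i, ((c.find? (fun p => p.1 == i)).map Prod.snd).getD "")] else nl) by funext nl p; by_cases h : i = p.1 <;> simp [h, dA]]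
  rw [PySem.List.foldl_ite_eq_foldl_filter (p := fun p : Int × String => i = p.1)
    (f := fun nl _ => dA nl [(i, ((c.find? (fun p => p.1 == i)).map Prod.snd).getD "")])]
  have hfc : ∀ x ∈ c, (decide (i = x.1)) = (fun p : Int × String => p.1 == i) x := by
    intro x _
    by_cases h : i = x.1
    · simp [h]
    · simp [h, show x.1 ≠ i from fun hh => h (Eq.symm hh)]
  rw [List.filter_congr hfc]
  rw [filter_key_nodup i c hc]
  cases hf : c.find? (fun p => p.1 == i) with
  | none => simp
  | some p =>
    have hp1 : p.1 = i := by simpa using List.find?_some hf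
    simp only [Option.map_some, Option.getD_some, List.map_cons, List.map_nil,
      List.foldl_cons, List.foldl_nil]
    congr 2
    exact Prod.ext (by simp [hp1]) rfl

theorem b_fold : ∀ (L : List (Int × String))
    (res : List (List (Int × String))) (seen : PySem.Set (Int × String)),
      (∀ p, p ∈ seen ↔ [p] ∈ res) →
      (L.foldl (fun (st : List (List (Int × String)) × PySem.Set (Int × String)) kv =>
          if kv ∉ st.2 then (st.1 ++ [[kv]], PySem.Set.add st.2 kv) else st) (res, seen)).1
        = (L.map (fun p => [p])).foldl dA res := by
  intro L
  induction L with
  | nil => intro res seen _; rfl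
  | cons p L ih =>
    intro res seen hinv
    simp only [List.foldl_cons, List.map_cons]
    by_cases hmem : p ∈ seen
    · rw [if_neg (by simpa using hmem)]
      have : dA res [p] = res := by unfold dA; rw [if_pos ((hinv p).1 hmem)]
      rw [this] at *
      exact ih res seen hinv
    · rw [if_pos (by simpa using hmem)]
      have hda : dA res [p] = res ++ [[p]] := by
        unfold dA; rw [if_neg (fun h => hmem ((hinv p).2 h))]
      rw [hda]
      refine ih _ _ ?_
      intro q
      rw [PySem.Set.mem_add]
      constructor
      · rintro (hq | rfl)
        · exact List.mem_append_left _ ((hinv q).1 hq)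
        · exact List.mem_append_right _ (by simp)
      · intro hq
        rcases List.mem_append.1 hq with hq | hq
        · exact Or.inl ((hinv q).2 hq)
        · simp only [List.mem_singleton, List.cons.injEq] at hq
          exact Or.inr hq.1
theorem sort_canteen_eq_alt (alist : List (List (Int × String)))
    (hpre : ∀ c ∈ alist, (c.map Prod.fst).Nodup) :
    sort_canteen alist = sort_canteen_alt alist := by
  unfold sort_canteen sort_canteen_alt
  simp only []
  set pairs := alist.flatMap (fun canteen => canteen) with hpairs
  set P := PySem.List.sorted pairs (fun kv => kv.1) with hP
  set K := alist.flatMap (fun c => c.map Prod.fst) with hK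
  -- A's first loop collects the keys
  have hlst : alist.foldl (fun acc i => (i.map Prod.fst).foldl (fun l k => l ++ [k]) acc) [] = K := by
    rw [show (fun (acc : List Int) (i : List (Int × String)) =>
          (i.map Prod.fst).foldl (fun l k => l ++ [k]) acc)
        = (fun acc i => acc ++ i.map Prod.fst) by
      funext acc i; exact PySem.List.foldl_append_singleton_eq_self (i.map Prod.fst) acc]
    simpa using PySem.List.foldl_append_eq_flatMap (fun i : List (Int × String) => i.map Prod.fst) alist []
  rw [hlst]
  -- A's triple loop is the dA fold over the key-grouped pair blocks
  have hA : (pvMergeSort K).foldl (fun new_list i =>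
      alist.foldl (fun new_list canteen =>
        (canteen.map Prod.fst).foldl (fun new_list key =>
          if i = key then
            let sub_information := [(i, ((canteen.find? (fun p => p.1 == i)).map Prod.snd).getD "")]
            if sub_information ∈ new_list then new_list else new_list ++ [sub_information]
          else new_list) new_list) new_list) []
      = ((pvMergeSort K).flatMap
          (fun i => (pairs.filter (fun p => p.1 == i)).map (fun p => [p]))).foldl dA [] := by
    rw [List.foldl_flatMap]
    refine PySem.List.foldl_congr_mem _ _ _ _ ?_
    intro nl i _
    have step1 : ∀ (nl' : List (List (Int × String))), ∀ c ∈ alist,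
        (c.map Prod.fst).foldl (fun new_list key =>
          if i = key then
            let sub_information := [(i, ((c.find? (fun p => p.1 == i)).map Prod.snd).getD "")]
            if sub_information ∈ new_list then new_list else new_list ++ [sub_information]
          else new_list) nl'
        = ((c.filter (fun p => p.1 == i)).map (fun p => [p])).foldl dA nl' :=
      fun nl' c hc => inner_canteen i c (hpre c hc) nl'
    rw [PySem.List.foldl_congr_mem alist _
      (fun nl' c => ((c.filter (fun p => p.1 == i)).map (fun p => [p])).foldl dA nl') _
      (fun nl' c hc => step1 nl' c hc)]
    rw [← List.foldl_flatMap]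
    have : alist.flatMap (fun c => (c.filter (fun p => p.1 == i)).map (fun p => [p]))
        = (pairs.filter (fun p => p.1 == i)).map (fun p => [p]) := by
      rw [hpairs, List.filter_flatMap, List.map_flatMap]
    rw [this]
  rw [hA, foldl_dA_dedupF]
  -- B's loop is the dA fold over the sorted pairs
  have hB : (P.foldl
      (fun (st : List (List (Int × String)) × PySem.Set (Int × String)) kv =>
        if kv ∉ st.2 then (st.1 ++ [[kv]], PySem.Set.add st.2 kv) else st)
      ([], PySem.Set.empty)).1 = (P.map (fun p => [p])).foldl dA [] :=
    b_fold P [] PySem.Set.empty (by simp [PySem.Set.empty])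
  rw [hB]
  -- the sorted key lists coincide
  have hkeys : pvMergeSort K = P.map Prod.fst := by
    refine PySem.List.eq_of_perm_of_pairwise_le_of_injective (fun x : Int => x)
      (fun a b h => h) ?_ ?_ ?_
    · refine (pvMergeSort_perm K).trans ?_
      have h1 : pairs.map Prod.fst = K := by
        rw [hpairs, hK, List.map_flatMap]
      have h2 : (P.map Prod.fst).Perm (pairs.map Prod.fst) :=
        (PySem.List.sorted_perm pairs (fun kv => kv.1) false).map Prod.fst
      rw [h1] at h2
      exact h2.symm
    · exact pvMergeSort_pairwise K
    · exact PySem.List.sorted_map_key_pairwise pairs (fun kv => kv.1)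
  -- group the sorted pairs by key
  have hgroup : P.map (fun p => [p])
      = (dedupF (pvMergeSort K)).flatMap
          (fun i => (pairs.filter (fun p => p.1 == i)).map (fun p => [p])) := by
    conv_lhs => rw [← grouping P (PySem.List.sorted_map_key_pairwise pairs (fun kv => kv.1))]
    rw [List.map_flatMap, hkeys]
    refine List.flatMap_congr ?_
    intro k _
    rw [hP, filter_sorted]
  rw [hgroup]

-- ===== VERDICT (by name: the statement is the Claim_ definition above) =====
theorem sort_canteen_spec : Claim_equal_sort_canteen := by
  intro alist _ hpre
  show sort_canteen alist = sort_canteen_alt alist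
  exact sort_canteen_eq_alt alist hpre
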